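-- pv_equiv track=rewrite | github.com/masbagusyutl/catopia | c.py | find_pets_to_level_up
-- ===== SOURCE A (Python) =====
-- def find_pets_to_level_up(pets, required_count=5):
--     pets_grouped = {}
--     for pet in pets:
--         key = (pet['name'], pet['level'])
--         if key not in pets_grouped:
--             pets_grouped[key] = []
--         pets_grouped[key].append(pet)
--
--     eligible_pets = []
--     for group in pets_grouped.values():
--         if len(group) >= required_count:
--             eligible_pets.extend(group[:required_count])
--             break
--
--     return eligible_pets
-- ===== SOURCE B (Python) =====
-- def find_pets_to_level_up(pets, required_count=5):
--     counts = {}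
--     for pet in pets:
--         key = (pet['name'], pet['level'])
--         counts[key] = counts.get(key, 0) + 1
--     winner = next((k for k, c in counts.items() if c >= required_count), None)
--     if winner is None:
--         return []
--     return [p for p in pets if (p['name'], p['level']) == winner][:required_count]
-- ===== Notes on version B (the rewrite author's own statement) =====
-- stated objective: alternative
-- what changed: B never materialises the per-key groups: it builds an insertion-ordered count per (name, level) key, picks the first key whose count reaches required_count, and collects the winner's pets in a single filtering pass sliced to required_count, instead of A's building every group in full and then scanning the groups.
import Mathlib
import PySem

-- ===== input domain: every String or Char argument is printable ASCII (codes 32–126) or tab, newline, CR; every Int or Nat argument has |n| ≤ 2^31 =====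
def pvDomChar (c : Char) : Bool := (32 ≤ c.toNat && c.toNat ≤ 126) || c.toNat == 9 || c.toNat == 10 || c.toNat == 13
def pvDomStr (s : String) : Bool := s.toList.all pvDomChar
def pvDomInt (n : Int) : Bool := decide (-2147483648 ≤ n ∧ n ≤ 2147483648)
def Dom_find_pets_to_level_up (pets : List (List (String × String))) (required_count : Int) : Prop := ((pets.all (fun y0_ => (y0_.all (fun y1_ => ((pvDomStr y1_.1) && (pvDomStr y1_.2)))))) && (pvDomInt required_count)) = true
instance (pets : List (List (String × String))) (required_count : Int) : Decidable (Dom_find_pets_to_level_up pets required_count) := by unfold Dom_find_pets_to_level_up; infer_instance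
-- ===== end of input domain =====

-- B replaces A's build-all-groups-then-scan with count-per-key → pick first qualifying key → one
-- filtering pass sliced to required_count (objective: alternative decomposition, same O(n) cost).

-- ===== PORT A =====
-- pet['name'] / pet['level'] (a KeyError when absent is excluded by Pre_; inside Pre_ getD = the lookup)
def pvKey (pet : List (String × String)) : String × String :=
  ((PySem.Dict.ofList pet).getD "name" "", (PySem.Dict.ofList pet).getD "level" "")

-- the 'for group in pets_grouped.values(): … break' loop (first group with len ≥ required_count)
def pvFirstEligible (required_count : Int) :
    List (List (List (String × String))) → List (List (String × String))
  | [] => []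
  | g :: gs =>
    if required_count ≤ (g.length : Int) then PySem.List.slice g none (some required_count)
    else pvFirstEligible required_count gs

def find_pets_to_level_up (pets : List (List (String × String))) (required_count : Int) :
    List (List (String × String)) :=
  let grouped := pets.foldl (fun d pet =>
      let key := pvKey pet
      let d' := if d.contains key then d
                else d.insert key ([] : List (List (String × String)))
      d'.insert key (d'.getD key [] ++ [pet])) PySem.Dict.empty
  pvFirstEligible required_count grouped.values

-- ===== PORT B =====
def find_pets_to_level_up_alt (pets : List (List (String × String))) (required_count : Int) :
    List (List (String × String)) :=
  let counts := pets.foldl (fun d pet => d.insert (pvKey pet) (d.getD (pvKey pet) 0 + 1))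
      (PySem.Dict.empty : PySem.Dict (String × String) Int)
  match counts.items.find? (fun kc => required_count ≤ kc.2) with
  | none => []
  | some kc =>
      PySem.List.slice (pets.filter (fun p => pvKey p == kc.1)) none (some required_count)

-- ===== PRECONDITION & SPEC =====
-- Pre_ excludes exactly the pets lacking a 'name' or 'level' key, on which A raises KeyError.
def Pre_find_pets_to_level_up (pets : List (List (String × String))) (required_count : Int) : Prop :=
  (pets.all (fun pet => (PySem.Dict.ofList pet).contains "name"
      && (PySem.Dict.ofList pet).contains "level")) = true
instance (pets : List (List (String × String))) (required_count : Int) : Decidable (Pre_find_pets_to_level_up pets required_count) := by unfold Pre_find_pets_to_level_up; infer_instance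

def pvWitness_find_pets_to_level_up : (List (List (String × String))) × Int :=
  ([[("name", "a"), ("level", "1")]], 1)

def Spec_find_pets_to_level_up (pets : List (List (String × String))) (required_count : Int) (out : List (List (String × String))) : Prop := out = find_pets_to_level_up_alt pets required_count
instance (pets : List (List (String × String))) (required_count : Int) (out : List (List (String × String))) : Decidable (Spec_find_pets_to_level_up pets required_count out) := by unfold Spec_find_pets_to_level_up; infer_instance

-- ===== CLAIM (what is proved, stated in full; the proofs are below) =====
def Claim_equal_find_pets_to_level_up : Prop := ∀ (pets : List (List (String × String))) (required_count : Int), Dom_find_pets_to_level_up pets required_count → Pre_find_pets_to_level_up pets required_count → Spec_find_pets_to_level_up pets required_count (find_pets_to_level_up pets required_count)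

-- ===== LEMMAS AND PROOFS =====

-- A's if-then-append step is exactly Dict.modify at the key.
theorem pv_step_eq_modify (d : PySem.Dict (String × String) (List (List (String × String))))
    (pet : List (String × String)) :
    (let key := pvKey pet
     let d' := if d.contains key then d
               else d.insert key ([] : List (List (String × String)))
     d'.insert key (d'.getD key [] ++ [pet]))
      = d.modify (pvKey pet) [] (· ++ [pet]) := by
  by_cases h : d.contains (pvKey pet)
  · simp [h, PySem.Dict.modify]
  · have h' : d.contains (pvKey pet) = false := by simpa using h
    have hd : d.getD (pvKey pet) [] = [] := PySem.Dict.getD_of_not_contains d [] h'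
    simp [h', PySem.Dict.modify, PySem.Dict.insert_insert_self, PySem.Dict.getD_insert_self, hd]

-- The group stored at k is the filter of pets by key k.
theorem pv_grouped_getD (pets : List (List (String × String))) (k : String × String) :
    (pets.foldl (fun d pet => d.modify (pvKey pet) [] (· ++ [pet]))
        (PySem.Dict.empty : PySem.Dict (String × String) (List (List (String × String))))).getD k []
      = pets.filter (fun p => pvKey p == k) := by
  have h := PySem.Dict.getD_foldl_modify_append (pets.map (fun p => (pvKey p, p)))
      (PySem.Dict.empty : PySem.Dict (String × String) (List (List (String × String)))) k
  rw [List.foldl_map] at h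
  rw [h, List.filter_map]
  simp [Function.comp_def]

-- count of key k among the pets' keys = length of the filter by k (as Int)
theorem pv_count_eq_len (pets : List (List (String × String))) (k : String × String) :
    (((pets.map pvKey).count k : Nat) : Int)
      = ((pets.filter (fun p => pvKey p == k)).length : Int) := by
  have h1 : (pets.map pvKey).count k = pets.countP (fun p => pvKey p == k) := by
    simp only [List.count_eq_countP, List.countP_map]
    rfl
  rw [h1, List.countP_eq_length_filter]

-- the two scans agree: A's first-long-enough group vs B's first-big-enough count
theorem pv_scan_eq (pets : List (List (String × String))) (rc : Int)
    (S : List (String × String)) :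
    pvFirstEligible rc (S.map (fun k => pets.filter (fun p => pvKey p == k)))
      = match (S.map (fun k => (k, (((pets.map pvKey).count k : Nat) : Int)))).find?
            (fun kc => rc ≤ kc.2) with
        | none => []
        | some kc => PySem.List.slice (pets.filter (fun p => pvKey p == kc.1)) none (some rc) := by
  induction S with
  | nil => simp [pvFirstEligible]
  | cons k S ih =>
    simp only [List.map_cons, pvFirstEligible, List.find?]
    rw [pv_count_eq_len pets k]
    by_cases h : rc ≤ ((pets.filter (fun p => pvKey p == k)).length : Int)
    · simp [h]
    · simp [h, ih]

-- ===== VERDICT (by name: the statement is the Claim_ definition above) =====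
theorem find_pets_to_level_up_spec : Claim_equal_find_pets_to_level_up := by
  intro pets rc _ _
  unfold Spec_find_pets_to_level_up find_pets_to_level_up find_pets_to_level_up_alt
  -- rewrite A's fold into the modify fold
  have hfold : pets.foldl (fun d pet =>
      let key := pvKey pet
      let d' := if d.contains key then d
                else d.insert key ([] : List (List (String × String)))
      d'.insert key (d'.getD key [] ++ [pet])) PySem.Dict.empty
      = pets.foldl (fun d pet => d.modify (pvKey pet) [] (· ++ [pet])) PySem.Dict.empty := by
    congr 1
    funext d pet
    exact pv_step_eq_modify d pet
  rw [hfold]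
  -- counts = counter of the key list
  have hcnt : pets.foldl (fun d pet => d.insert (pvKey pet) (d.getD (pvKey pet) 0 + 1))
      (PySem.Dict.empty : PySem.Dict (String × String) Int)
      = PySem.Dict.counter (pets.map pvKey) := by
    rw [← PySem.Dict.foldl_insert_getD_add_one_eq_counter, List.foldl_map]
  -- the modify fold's keys are the distinct keys in first-seen order, its values the filters
  have hnd : (pets.foldl (fun d pet => d.modify (pvKey pet) [] (· ++ [pet]))
      (PySem.Dict.empty : PySem.Dict (String × String) (List (List (String × String))))).keys.Nodup :=
    PySem.Dict.nodup_keys_foldl_modify_key pets pvKey [] (fun _ pet => (· ++ [pet])) _ (by simp)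
  have hkeys : (pets.foldl (fun d pet => d.modify (pvKey pet) [] (· ++ [pet]))
      (PySem.Dict.empty : PySem.Dict (String × String) (List (List (String × String))))).keys
      = PySem.Set.ofList (pets.map pvKey) := by
    rw [PySem.Dict.keys_foldl_modify_key pets pvKey [] (fun _ pet => (· ++ [pet]))]
    simp [PySem.Set.update_nil_left]
  have hvals : (pets.foldl (fun d pet => d.modify (pvKey pet) [] (· ++ [pet]))
      (PySem.Dict.empty : PySem.Dict (String × String) (List (List (String × String))))).values
      = (PySem.Set.ofList (pets.map pvKey)).map (fun k => pets.filter (fun p => pvKey p == k)) := by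
    rw [PySem.Dict.values_eq_map_keys _ hnd [], hkeys]
    exact List.map_congr_left (fun k _ => pv_grouped_getD pets k)
  simp only [hcnt, hvals, PySem.Dict.items_counter]
  exact pv_scan_eq pets rc (PySem.Set.ofList (pets.map pvKey))
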